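-- pv_equiv track=rewrite | github.com/hehesam/ACM-rep | leetCode/AmazoneInterveiw/Maximum Length of Subarray With Positive Product.py | way1
-- ===== SOURCE A (Python) =====
-- def way1(nums):
--     max_num = 0
--     size = len(nums)
--     if size==1:
--         if nums[0] > 0:
--             return 1
--
--
--     i = 0
--     while i < size:
--     # for i in range(size):
--         # for large inputs
--         if size-1 <= max_num:
--             return max_num
--
--         if nums[i] != 0:
--
--             pos = neg = 0
--
--             if nums[i] < 0:
--                 neg = 1
--             else :
--                 pos = 1
--
--             max_num = max(max_num, pos)
--
--             # for j in range(i+1, size):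
--             j = i+1
--             while j < size:
--                 if nums[j] < 0:
--                     neg += 1
--                 elif nums[j] == 0:
--                     break
--                 if neg %2 == 0:
--                     max_num = max(max_num, j-i+1)
--                 j += 1
--         i += 1
--     return max_num
-- ===== SOURCE B (Python) =====
-- def way1(nums):
--     ans = pos = neg = 0
--     for x in nums:
--         if x == 0:
--             pos, neg = 0, 0
--         elif x > 0:
--             pos, neg = pos + 1, (neg + 1 if neg else 0)
--         else:
--             pos, neg = (neg + 1 if neg else 0), pos + 1
--         ans = max(ans, pos)
--     return ans
-- ===== Notes on version B (the rewrite author's own statement) =====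
-- stated objective: alternative
-- what changed: Replaced A's scan over all start positions (with an inner forward scan counting negatives, plus an early-exit bound) by the standard single left-to-right DP pass that tracks the lengths of the longest positive-product and negative-product subarrays ending at the current element.
import Mathlib
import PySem

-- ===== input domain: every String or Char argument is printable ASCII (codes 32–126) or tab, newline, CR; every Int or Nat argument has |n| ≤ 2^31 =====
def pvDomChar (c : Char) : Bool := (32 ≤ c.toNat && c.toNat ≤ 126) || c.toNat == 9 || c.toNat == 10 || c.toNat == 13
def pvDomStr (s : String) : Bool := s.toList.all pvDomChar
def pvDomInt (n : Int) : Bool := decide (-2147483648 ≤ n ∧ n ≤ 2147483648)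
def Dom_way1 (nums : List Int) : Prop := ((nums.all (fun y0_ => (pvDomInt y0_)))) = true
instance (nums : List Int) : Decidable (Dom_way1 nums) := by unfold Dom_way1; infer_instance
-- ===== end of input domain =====

-- B replaces A's scan over all start positions (inner forward scan per start) by a single
-- left-to-right pass tracking the lengths of the longest positive-product and
-- negative-product runs ending at the current element (objective: alternative).

-- ===== PORT A =====
-- inner while loop of A: j scans forward, r is nums.drop j (so `j < size` is `r ≠ []` and
-- the head of r is nums[j]); neg, maxn as in the Python; `neg % 2` is Python's %, ported
-- with PySem.Int.mod
def way1InnerA (i j : Nat) (r : List Int) (neg maxn : Int) : Int :=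
  match r with
  | [] => maxn
  | x :: r' =>
    if x < 0 then
      way1InnerA i (j + 1) r' (neg + 1)
        (if PySem.Int.mod (neg + 1) 2 = 0 then max maxn ((j : Int) - (i : Int) + 1) else maxn)
    else if x = 0 then maxn
    else
      way1InnerA i (j + 1) r' neg
        (if PySem.Int.mod neg 2 = 0 then max maxn ((j : Int) - (i : Int) + 1) else maxn)

-- outer while loop of A: i scans start positions, r is nums.drop i; the first branch is
-- A's early return `if size-1 <= max_num: return max_num`
def way1OuterA (size : Int) (i : Nat) (r : List Int) (maxn : Int) : Int :=
  match r with
  | [] => maxn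
  | x :: r' =>
    if size - 1 ≤ maxn then maxn
    else if x ≠ 0 then
      way1OuterA size (i + 1) r'
        (way1InnerA i (i + 1) r' (if x < 0 then 1 else 0)
          (max maxn (if x < 0 then (0 : Int) else 1)))
    else way1OuterA size (i + 1) r' maxn

def way1 (nums : List Int) : Int :=
  -- `if size==1: if nums[0]>0: return 1` (index 0 is in range there; getD only totalises)
  if (nums.length : Int) = 1 ∧ 0 < nums.getD 0 0 then 1
  else way1OuterA (nums.length : Int) 0 nums 0

-- ===== PORT B =====
-- one step of Source B's loop; state = (ans, pos, neg); `ans = max(ans, pos)` with the new pos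
def way1Step (st : Int × Int × Int) (x : Int) : Int × Int × Int :=
  if x = 0 then (max st.1 0, 0, 0)
  else if 0 < x then
    (max st.1 (st.2.1 + 1), st.2.1 + 1, if st.2.2 ≠ 0 then st.2.2 + 1 else 0)
  else
    (max st.1 (if st.2.2 ≠ 0 then st.2.2 + 1 else 0),
     (if st.2.2 ≠ 0 then st.2.2 + 1 else 0), st.2.1 + 1)

def way1_alt (nums : List Int) : Int :=
  (nums.foldl way1Step (0, 0, 0)).1

-- ===== PRECONDITION & SPEC =====
def Spec_way1 (nums : List Int) (out : Int) : Prop := out = way1_alt nums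
instance (nums : List Int) (out : Int) : Decidable (Spec_way1 nums out) := by unfold Spec_way1; infer_instance

-- ===== CLAIM (what is proved, stated in full; the proofs are below) =====
def Claim_equal_way1 : Prop := ∀ (nums : List Int), Dom_way1 nums → Spec_way1 nums (way1 nums)

-- ===== LEMMAS AND PROOFS =====

-- sign helpers
lemma sign_mul_pos {x P : Int} (hx : 0 < x) (h : 0 < x * P) : 0 < P := by
  rcases mul_pos_iff.mp h with ⟨_, h2⟩ | ⟨h1, _⟩ <;> omega

lemma sign_mul_neg {x P : Int} (hx : 0 < x) (h : x * P < 0) : P < 0 := by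
  rcases mul_neg_iff.mp h with ⟨_, h2⟩ | ⟨h1, _⟩ <;> omega

lemma sign_neg_mul_pos {x P : Int} (hx : x < 0) (h : 0 < x * P) : P < 0 := by
  rcases mul_pos_iff.mp h with ⟨h1, _⟩ | ⟨_, h2⟩ <;> omega

lemma sign_neg_mul_neg {x P : Int} (hx : x < 0) (h : x * P < 0) : 0 < P := by
  rcases mul_neg_iff.mp h with ⟨h1, _⟩ | ⟨_, h2⟩ <;> omega

-- generic "longest prefix whose running product satisfies c" machine
def pstep (c : Int → Bool) (st : Int × Nat × Nat) (x : Int) : Int × Nat × Nat :=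
  (st.1 * x, st.2.1 + 1, if c (st.1 * x) then st.2.1 + 1 else st.2.2)

def mExt (c : Int → Bool) (s : List Int) : Nat := (s.foldl (pstep c) (1, 0, 0)).2.2

def mpp (s : List Int) : Nat := mExt (fun p => decide (0 < p)) s
def mnp (s : List Int) : Nat := mExt (fun p => decide (p < 0)) s

def cntNeg (l : List Int) : Nat := l.countP (fun x => decide (x < 0))

def Msuf (l : List Int) : Nat := (l.tails.map mpp).foldr max 0

lemma mExt_state (c : Int → Bool) (s : List Int) :
    s.foldl (pstep c) (1, 0, 0) = (s.prod, s.length, mExt c s) := by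
  induction s using List.reverseRecOn with
  | nil => rfl
  | append_singleton s x ih =>
    have hm : mExt c (s ++ [x]) = if c (s.prod * x) then s.length + 1 else mExt c s := by
      show ((s ++ [x]).foldl (pstep c) (1, 0, 0)).2.2 = _
      rw [List.foldl_append, ih, List.foldl_cons, List.foldl_nil]
      rfl
    rw [List.foldl_append, ih, List.foldl_cons, List.foldl_nil, hm]
    simp [pstep, List.prod_append]

lemma mExt_snoc (c : Int → Bool) (s : List Int) (x : Int) :
    mExt c (s ++ [x]) = if c (s.prod * x) then s.length + 1 else mExt c s := by
  show ((s ++ [x]).foldl (pstep c) (1, 0, 0)).2.2 = _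
  rw [List.foldl_append, mExt_state, List.foldl_cons, List.foldl_nil]
  rfl

lemma mExt_le_length (c : Int → Bool) (s : List Int) : mExt c s ≤ s.length := by
  induction s using List.reverseRecOn with
  | nil => simp [mExt]
  | append_singleton s x ih =>
    rw [mExt_snoc]
    split
    · simp
    · simp; omega

lemma mExt_qual (c : Int → Bool) (s : List Int) :
    mExt c s = 0 ∨ c ((s.take (mExt c s)).prod) = true := by
  induction s using List.reverseRecOn with
  | nil => left; rfl
  | append_singleton s x ih =>
    rw [mExt_snoc]
    split
    · right
      rename_i hc
      rw [List.take_of_length_le (by simp)]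
      simpa [List.prod_append] using hc
    · rcases ih with h | h
      · left; exact h
      · right
        rw [List.take_append_of_le_length (mExt_le_length c s)]
        exact h

lemma mExt_max (c : Int → Bool) (s : List Int) (k : Nat) (hk : k ≤ s.length)
    (h : c ((s.take k).prod) = true) : k ≤ mExt c s := by
  induction s using List.reverseRecOn generalizing k with
  | nil =>
    have h0 : mExt c ([] : List Int) = 0 := rfl
    simp at hk; omega
  | append_singleton s x ih =>
    rw [mExt_snoc]
    split
    · simp at hk ⊢; omega
    · rename_i hc
      rcases Nat.lt_or_ge k (s.length + 1) with hlt | hge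
      · have hks : k ≤ s.length := by omega
        rw [List.take_append_of_le_length hks] at h
        exact ih k hks h
      · exfalso
        have hk' : k = s.length + 1 := by simp at hk; omega
        rw [hk', List.take_of_length_le (by simp)] at h
        simp only [List.prod_append, List.prod_cons, List.prod_nil, mul_one] at h
        rw [h] at hc
        exact hc rfl

-- specialisations
lemma mpp_qual (s : List Int) : (0 : Int) < (s.take (mpp s)).prod := by
  rcases mExt_qual (fun p => decide (0 < p)) s with h | h
  · rw [mpp, h]; simp
  · simpa using h

lemma mpp_max (s : List Int) (k : Nat) (hk : k ≤ s.length)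
    (h : (0 : Int) < (s.take k).prod) : k ≤ mpp s :=
  mExt_max _ s k hk (by simpa using h)

lemma mnp_qual (s : List Int) : mnp s = 0 ∨ (s.take (mnp s)).prod < 0 := by
  rcases mExt_qual (fun p => decide (p < 0)) s with h | h
  · left; exact h
  · right; simpa using h

lemma mnp_max (s : List Int) (k : Nat) (hk : k ≤ s.length)
    (h : (s.take k).prod < 0) : k ≤ mnp s :=
  mExt_max _ s k hk (by simpa using h)

lemma mpp_nil : mpp ([] : List Int) = 0 := rfl
lemma mnp_nil : mnp ([] : List Int) = 0 := rfl

lemma mpp_le_length (s : List Int) : mpp s ≤ s.length := mExt_le_length _ s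
lemma mnp_le_length (s : List Int) : mnp s ≤ s.length := mExt_le_length _ s

-- cons recurrences (the DP step of B)
lemma mpp_cons_zero (s : List Int) : mpp ((0 : Int) :: s) = 0 := by
  rcases mExt_qual (fun p => decide (0 < p)) ((0 : Int) :: s) with h | h
  · exact h
  · rcases hm : mExt (fun p => decide (0 < p)) ((0 : Int) :: s) with _ | k
    · exact hm
    · rw [hm] at h; simp [List.take_succ_cons] at h

lemma mnp_cons_zero (s : List Int) : mnp ((0 : Int) :: s) = 0 := by
  rcases mExt_qual (fun p => decide (p < 0)) ((0 : Int) :: s) with h | h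
  · exact h
  · rcases hm : mExt (fun p => decide (p < 0)) ((0 : Int) :: s) with _ | k
    · exact hm
    · rw [hm] at h; simp [List.take_succ_cons] at h

lemma mpp_cons_pos (x : Int) (hx : 0 < x) (s : List Int) : mpp (x :: s) = mpp s + 1 := by
  apply le_antisymm
  · rcases hm : mpp (x :: s) with _ | k
    · omega
    · have h := mpp_qual (x :: s)
      rw [hm, List.take_succ_cons, List.prod_cons] at h
      have hks : k ≤ s.length := by
        have h2 := mpp_le_length (x :: s); rw [hm] at h2; simp at h2; omega
      have := mpp_max s k hks (sign_mul_pos hx h)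
      omega
  · apply mpp_max (x :: s) (mpp s + 1) (by have := mpp_le_length s; simp; omega)
    rw [List.take_succ_cons, List.prod_cons]
    exact mul_pos hx (mpp_qual s)

lemma mnp_cons_pos (x : Int) (hx : 0 < x) (s : List Int) :
    mnp (x :: s) = if mnp s = 0 then 0 else mnp s + 1 := by
  split
  · rename_i h0
    rcases hm : mnp (x :: s) with _ | k
    · rfl
    · exfalso
      rcases mnp_qual (x :: s) with h | h
      · omega
      · rw [hm, List.take_succ_cons, List.prod_cons] at h
        have hks : k ≤ s.length := by
          have h2 := mnp_le_length (x :: s); rw [hm] at h2; simp at h2; omega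
        have hneg := sign_mul_neg hx h
        have := mnp_max s k hks hneg
        have hk0 : k = 0 := by omega
        rw [hk0] at hneg; norm_num at hneg
  · rename_i h0
    apply le_antisymm
    · rcases hm : mnp (x :: s) with _ | k
      · omega
      · rcases mnp_qual (x :: s) with h | h
        · omega
        · rw [hm, List.take_succ_cons, List.prod_cons] at h
          have hks : k ≤ s.length := by
            have h2 := mnp_le_length (x :: s); rw [hm] at h2; simp at h2; omega
          have := mnp_max s k hks (sign_mul_neg hx h)
          omega
    · apply mnp_max (x :: s) (mnp s + 1) (by have := mnp_le_length s; simp; omega)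
      rw [List.take_succ_cons, List.prod_cons]
      rcases mnp_qual s with h | h
      · omega
      · exact mul_neg_of_pos_of_neg hx h

lemma mpp_cons_neg (x : Int) (hx : x < 0) (s : List Int) :
    mpp (x :: s) = if mnp s = 0 then 0 else mnp s + 1 := by
  split
  · rename_i h0
    rcases hm : mpp (x :: s) with _ | k
    · rfl
    · exfalso
      have h := mpp_qual (x :: s)
      rw [hm, List.take_succ_cons, List.prod_cons] at h
      have hks : k ≤ s.length := by
        have h2 := mpp_le_length (x :: s); rw [hm] at h2; simp at h2; omega
      have hneg := sign_neg_mul_pos hx h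
      have := mnp_max s k hks hneg
      have hk0 : k = 0 := by omega
      rw [hk0] at hneg; norm_num at hneg
  · rename_i h0
    apply le_antisymm
    · rcases hm : mpp (x :: s) with _ | k
      · omega
      · have h := mpp_qual (x :: s)
        rw [hm, List.take_succ_cons, List.prod_cons] at h
        have hks : k ≤ s.length := by
          have h2 := mpp_le_length (x :: s); rw [hm] at h2; simp at h2; omega
        have := mnp_max s k hks (sign_neg_mul_pos hx h)
        omega
    · apply mpp_max (x :: s) (mnp s + 1) (by have := mnp_le_length s; simp; omega)
      rw [List.take_succ_cons, List.prod_cons]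
      rcases mnp_qual s with h | h
      · omega
      · exact mul_pos_of_neg_of_neg hx h

lemma mnp_cons_neg (x : Int) (hx : x < 0) (s : List Int) : mnp (x :: s) = mpp s + 1 := by
  apply le_antisymm
  · rcases hm : mnp (x :: s) with _ | k
    · omega
    · rcases mnp_qual (x :: s) with h | h
      · omega
      · rw [hm, List.take_succ_cons, List.prod_cons] at h
        have hks : k ≤ s.length := by
          have h2 := mnp_le_length (x :: s); rw [hm] at h2; simp at h2; omega
        have := mpp_max s k hks (sign_neg_mul_neg hx h)
        omega
  · apply mnp_max (x :: s) (mpp s + 1) (by have := mpp_le_length s; simp; omega)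
    rw [List.take_succ_cons, List.prod_cons]
    exact mul_neg_of_neg_of_pos hx (mpp_qual s)

-- sign of a zero-free product vs parity of its negative entries
lemma prod_sign_parity (l : List Int) (h0 : (0 : Int) ∉ l) :
    ((0 : Int) < l.prod ↔ Even (cntNeg l)) ∧ (l.prod < 0 ↔ ¬ Even (cntNeg l)) := by
  induction l with
  | nil => simp [cntNeg]
  | cons x l ih =>
    have hx : x ≠ 0 := fun h => h0 (by simp [h])
    have h0' : (0 : Int) ∉ l := fun h => h0 (List.mem_cons_of_mem _ h)
    obtain ⟨ih1, ih2⟩ := ih h0'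
    have hcnt : cntNeg (x :: l) = cntNeg l + if x < 0 then 1 else 0 := by
      simp [cntNeg, List.countP_cons]
    rw [List.prod_cons, hcnt]
    rcases lt_trichotomy x 0 with hxn | hx0 | hxp
    · simp only [if_pos hxn]
      constructor
      · constructor
        · intro h
          have := ih2.mp (sign_neg_mul_pos hxn h)
          simpa [Nat.even_add_one] using this
        · intro h
          have h2 : ¬ Even (cntNeg l) := by simpa [Nat.even_add_one] using h
          exact mul_pos_of_neg_of_neg hxn (ih2.mpr h2)
      · constructor
        · intro h
          have := ih1.mp (sign_neg_mul_neg hxn h)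
          simpa [Nat.even_add_one] using this
        · intro h
          have h2 : Even (cntNeg l) := by simpa [Nat.even_add_one] using h
          exact mul_neg_of_neg_of_pos hxn (ih1.mpr h2)
    · exact absurd hx0 hx
    · simp only [if_neg (by omega : ¬ x < 0), Nat.add_zero]
      constructor
      · constructor
        · intro h; exact ih1.mp (sign_mul_pos hxp h)
        · intro h; exact mul_pos hxp (ih1.mpr h)
      · constructor
        · intro h; exact ih2.mp (sign_mul_neg hxp h)
        · intro h; exact mul_neg_of_pos_of_neg hxp (ih2.mpr h)

lemma prod_pos_iff_even (l : List Int) (h0 : (0 : Int) ∉ l) :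
    ((0 : Int) < l.prod ↔ Even (cntNeg l)) := (prod_sign_parity l h0).1

-- mpp ignores everything from the first zero on
lemma mpp_append_zero (c r : List Int) : mpp (c ++ (0 : Int) :: r) = mpp c := by
  induction r using List.reverseRecOn with
  | nil =>
    rw [show c ++ [(0 : Int)] = c ++ [(0 : Int)] from rfl, mpp, mExt_snoc]
    simp [mpp]
  | append_singleton r z ih =>
    rw [show c ++ (0 : Int) :: (r ++ [z]) = (c ++ (0 : Int) :: r) ++ [z] by simp, mpp, mExt_snoc]
    have hz : (c ++ (0 : Int) :: r).prod = 0 := List.prod_eq_zero (by simp)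
    rw [hz]
    simpa [mpp] using ih

lemma mpp_snoc_iff (c : List Int) (y : Int) :
    mpp (c ++ [y]) = if (0 : Int) < c.prod * y then c.length + 1 else mpp c := by
  rw [mpp, mExt_snoc]
  by_cases h : (0 : Int) < c.prod * y
  · simp [h]
  · simp [h, mpp]

-- Python's `neg % 2 == 0` on a cast count is evenness
lemma mod_two_cast (n : Nat) : (PySem.Int.mod (n : Int) 2 = 0) ↔ Even n := by
  rw [PySem.Int.mod_eq_emod_of_pos (by norm_num)]
  rw [← Int.even_coe_nat, Int.even_iff]

-- one-step unfolding of the outer loop (plain rfl; avoids simp unfolding recursively)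
lemma outerA_cons (size : Int) (i : Nat) (x : Int) (r' : List Int) (maxn : Int) :
    way1OuterA size i (x :: r') maxn
      = if size - 1 ≤ maxn then maxn
        else if x ≠ 0 then
          way1OuterA size (i + 1) r'
            (way1InnerA i (i + 1) r' (if x < 0 then 1 else 0)
              (max maxn (if x < 0 then (0 : Int) else 1)))
        else way1OuterA size (i + 1) r' maxn := rfl

-- ===== A-side correctness =====

lemma innerA_eq (r' : List Int) : ∀ (c : List Int) (i : Nat) (m : Int),
    c ≠ [] → (0 : Int) ∉ c →
    way1InnerA i (i + c.length) r' ((cntNeg c : Int)) (max m (mpp c : Int))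
      = max m ((mpp (c ++ r') : Int)) := by
  induction r' with
  | nil => intro c i m hc h0; simp [way1InnerA]
  | cons y r'' ih =>
    intro c i m hc h0
    rcases lt_trichotomy y 0 with hy | hy | hy
    · simp only [way1InnerA, if_pos hy]
      have h0' : (0 : Int) ∉ c ++ [y] := by
        simp [List.mem_append]; exact ⟨fun h => h0 h, by omega⟩
      have hcnt : cntNeg (c ++ [y]) = cntNeg c + 1 := by
        simp [cntNeg, List.countP_append, hy]
      have hcond : (PySem.Int.mod ((cntNeg c : Int) + 1) 2 = 0) ↔ Even (cntNeg (c ++ [y])) := by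
        rw [hcnt]
        have := mod_two_cast (cntNeg c + 1)
        push_cast at this
        exact this
      have hprod : ((0 : Int) < c.prod * y) ↔ Even (cntNeg (c ++ [y])) := by
        have := prod_pos_iff_even _ h0'
        rwa [List.prod_append, List.prod_cons, List.prod_nil, mul_one] at this
      have hstep : (if PySem.Int.mod ((cntNeg c : Int) + 1) 2 = 0
            then max (max m (mpp c : Int)) (((i + c.length : Nat) : Int) - (i : Int) + 1)
            else max m (mpp c : Int)) = max m ((mpp (c ++ [y]) : Int)) := by
        by_cases he : Even (cntNeg (c ++ [y]))
        · rw [if_pos (hcond.mpr he), mpp_snoc_iff, if_pos (hprod.mpr he)]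
          have h1 : ((i + c.length : Nat) : Int) - (i : Int) + 1 = ((c.length + 1 : Nat) : Int) := by
            push_cast; ring
          have h2 : (mpp c : Int) ≤ ((c.length + 1 : Nat) : Int) := by
            have := mpp_le_length c
            push_cast; exact_mod_cast Nat.le_succ_of_le this
          rw [h1, max_assoc, max_eq_right h2]
        · rw [if_neg (fun h => he (hcond.mp h)), mpp_snoc_iff,
            if_neg (fun h => he (hprod.mp h))]
      rw [hstep]
      have hIH := ih (c ++ [y]) i m (by simp) h0'
      have e1 : (c ++ [y]).length = c.length + 1 := by simp
      have e2 : ((cntNeg (c ++ [y]) : Nat) : Int) = (cntNeg c : Int) + 1 := by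
        rw [hcnt]; push_cast; ring
      rw [e1, e2, ← Nat.add_assoc, List.append_assoc] at hIH
      simpa using hIH
    · subst hy
      simp only [way1InnerA, if_neg (lt_irrefl (0 : Int))]
      rw [mpp_append_zero]
      simp
    · simp only [way1InnerA, if_neg (by omega : ¬ y < 0), if_neg (by omega : ¬ y = 0)]
      have h0' : (0 : Int) ∉ c ++ [y] := by
        simp [List.mem_append]; exact ⟨fun h => h0 h, by omega⟩
      have hcnt : cntNeg (c ++ [y]) = cntNeg c := by
        simp [cntNeg, List.countP_append, show ¬ y < 0 by omega]
      have hcond : (PySem.Int.mod ((cntNeg c : Int)) 2 = 0) ↔ Even (cntNeg (c ++ [y])) := by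
        rw [hcnt]; exact mod_two_cast (cntNeg c)
      have hprod : ((0 : Int) < c.prod * y) ↔ Even (cntNeg (c ++ [y])) := by
        have := prod_pos_iff_even _ h0'
        rwa [List.prod_append, List.prod_cons, List.prod_nil, mul_one] at this
      have hstep : (if PySem.Int.mod ((cntNeg c : Int)) 2 = 0
            then max (max m (mpp c : Int)) (((i + c.length : Nat) : Int) - (i : Int) + 1)
            else max m (mpp c : Int)) = max m ((mpp (c ++ [y]) : Int)) := by
        by_cases he : Even (cntNeg (c ++ [y]))
        · rw [if_pos (hcond.mpr he), mpp_snoc_iff, if_pos (hprod.mpr he)]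
          have h1 : ((i + c.length : Nat) : Int) - (i : Int) + 1 = ((c.length + 1 : Nat) : Int) := by
            push_cast; ring
          have h2 : (mpp c : Int) ≤ ((c.length + 1 : Nat) : Int) := by
            have := mpp_le_length c
            push_cast; exact_mod_cast Nat.le_succ_of_le this
          rw [h1, max_assoc, max_eq_right h2]
        · rw [if_neg (fun h => he (hcond.mp h)), mpp_snoc_iff,
            if_neg (fun h => he (hprod.mp h))]
      rw [hstep]
      have hIH := ih (c ++ [y]) i m (by simp) h0'
      have e1 : (c ++ [y]).length = c.length + 1 := by simp
      have e2 : ((cntNeg (c ++ [y]) : Nat) : Int) = (cntNeg c : Int) := by rw [hcnt]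
      rw [e1, e2, ← Nat.add_assoc, List.append_assoc] at hIH
      simpa using hIH

lemma Msuf_nil : Msuf [] = 0 := rfl

lemma Msuf_cons (x : Int) (l : List Int) : Msuf (x :: l) = max (mpp (x :: l)) (Msuf l) := by
  simp [Msuf]

lemma Msuf_le_length (l : List Int) : Msuf l ≤ l.length := by
  induction l with
  | nil => simp [Msuf_nil]
  | cons x l ih =>
    rw [Msuf_cons]
    have := mpp_le_length (x :: l)
    simp at this ⊢
    omega

lemma mpp_singleton (x : Int) : mpp [x] = if 0 < x then 1 else 0 := by
  have h : ([x] : List Int) = [] ++ [x] := rfl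
  rw [h, mpp_snoc_iff]
  simp [mpp_nil]

lemma outerA_eq (r : List Int) : ∀ (i : Nat) (m size : Int),
    0 ≤ m → (r.length : Int) + 1 ≤ size →
    way1OuterA size i r m = max m (Msuf r : Int) := by
  induction r with
  | nil => intro i m size hm _; simp [way1OuterA, Msuf_nil, max_eq_left hm]
  | cons x r' ih =>
    intro i m size hm hlen
    by_cases hret : size - 1 ≤ m
    · rw [outerA_cons, if_pos hret]
      have h1 : (Msuf (x :: r') : Int) ≤ m := by
        have h2 : (Msuf (x :: r') : Int) ≤ ((x :: r').length : Int) := by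
          exact_mod_cast Msuf_le_length (x :: r')
        simp at h2 hlen
        omega
      exact (max_eq_left h1).symm
    · by_cases hx : x = 0
      · rw [outerA_cons, if_neg hret, if_neg (by simp [hx] : ¬ x ≠ 0)]
        rw [ih (i + 1) m size hm (by simp only [List.length_cons] at hlen ⊢; omega)]
        rw [hx, Msuf_cons, mpp_cons_zero]
        simp
      · rw [outerA_cons, if_neg hret, if_pos hx]
        have hpos : max m (if x < 0 then (0 : Int) else 1) = max m ((mpp [x] : Int)) := by
          rw [mpp_singleton]
          rcases lt_trichotomy x 0 with h | h | h
          · simp [h, show ¬ (0 : Int) < x by omega]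
          · exact absurd h hx
          · simp [show ¬ x < 0 by omega, h]
        have hneg : (if x < 0 then (1 : Int) else 0) = ((cntNeg [x] : Nat) : Int) := by
          simp only [cntNeg, List.countP_cons, List.countP_nil]
          split <;> rename_i h <;> simp [h]
        rw [hpos, hneg]
        have hinner := innerA_eq r' [x] i m (by simp) (by simp [Ne.symm hx])
        simp only [List.length_cons, List.length_nil, Nat.zero_add, List.cons_append,
          List.nil_append] at hinner
        rw [hinner]
        rw [ih (i + 1) (max m (mpp (x :: r') : Int)) size
          (le_trans hm (le_max_left _ _)) (by simp only [List.length_cons] at hlen ⊢; omega)]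
        rw [show Msuf (x :: r') = max (mpp (x :: r')) (Msuf r') from Msuf_cons _ _]
        push_cast [Nat.cast_max]
        rw [max_assoc]

lemma wayA_eq_Msuf (nums : List Int) : way1 nums = (Msuf nums : Int) := by
  match nums with
  | [] => simp [way1, way1OuterA, Msuf_nil]
  | [x] =>
    rw [way1]
    by_cases hx : 0 < x
    · rw [if_pos ⟨by norm_num, by simpa using hx⟩]
      rw [Msuf_cons, mpp_singleton, if_pos hx, Msuf_nil]
      simp
    · rw [if_neg (by simp [hx])]
      rw [outerA_cons, if_pos (by norm_num : (([x] : List Int).length : Int) - 1 ≤ 0)]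
      rw [Msuf_cons, mpp_singleton, if_neg hx, Msuf_nil]
      simp
  | x :: y :: l =>
    rw [way1]
    rw [if_neg (by rintro ⟨h1, -⟩; simp at h1; omega)]
    have hsz : ¬ (((x :: y :: l).length : Int) - 1 ≤ 0) := by
      simp only [List.length_cons]; omega
    rw [outerA_cons, if_neg hsz]
    by_cases hx : x = 0
    · rw [if_neg (by simp [hx] : ¬ x ≠ 0)]
      rw [outerA_eq (y :: l) 1 0 _ le_rfl (by simp only [List.length_cons]; omega)]
      rw [hx, show Msuf ((0 : Int) :: y :: l) = max (mpp ((0 : Int) :: y :: l)) (Msuf (y :: l)) from Msuf_cons _ _,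
        mpp_cons_zero]
      push_cast [Nat.cast_max]
      simp
    · rw [if_pos hx]
      have hpos : max (0 : Int) (if x < 0 then (0 : Int) else 1) = max 0 ((mpp [x] : Int)) := by
        rw [mpp_singleton]
        rcases lt_trichotomy x 0 with h | h | h
        · simp [h, show ¬ (0 : Int) < x by omega]
        · exact absurd h hx
        · simp [show ¬ x < 0 by omega, h]
      have hneg : (if x < 0 then (1 : Int) else 0) = ((cntNeg [x] : Nat) : Int) := by
        simp only [cntNeg, List.countP_cons, List.countP_nil]
        split <;> rename_i h <;> simp [h]
      rw [hpos, hneg]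
      have hinner := innerA_eq (y :: l) [x] 0 0 (by simp) (by simp [Ne.symm hx])
      simp only [List.length_cons, List.length_nil, Nat.zero_add, List.cons_append,
        List.nil_append] at hinner
      rw [hinner]
      rw [outerA_eq (y :: l) 1 _ _ (le_trans (by norm_num) (le_max_left _ _))
        (by simp only [List.length_cons]; omega)]
      rw [show Msuf (x :: y :: l) = max (mpp (x :: y :: l)) (Msuf (y :: l)) from Msuf_cons _ _]
      push_cast [Nat.cast_max]
      rw [show max (0 : Int) ((mpp (x :: y :: l) : Nat) : Int) = ((mpp (x :: y :: l) : Nat) : Int) from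
        max_eq_right (Int.natCast_nonneg _)]

-- ===== B-side correctness =====

lemma altB_state (l : List Int) :
    l.foldl way1Step (0, 0, 0)
      = ((Msuf l.reverse : Int), (mpp l.reverse : Int), (mnp l.reverse : Int)) := by
  induction l using List.reverseRecOn with
  | nil => simp [Msuf_nil, mpp_nil, mnp_nil]
  | append_singleton p x ih =>
    rw [List.foldl_append, List.foldl_cons, List.foldl_nil, ih]
    have hrev : (p ++ [x]).reverse = x :: p.reverse := by simp
    rw [hrev]
    rcases lt_trichotomy x 0 with hx | hx | hx
    · simp only [way1Step, if_neg (by omega : ¬ x = 0), if_neg (by omega : ¬ (0 : Int) < x)]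
      rw [Msuf_cons, mpp_cons_neg x hx, mnp_cons_neg x hx]
      by_cases h0 : mnp p.reverse = 0
      · have hne : ¬ ((mnp p.reverse : Nat) : Int) ≠ 0 := by simp [h0]
        simp only [if_neg hne, if_pos h0]
        push_cast
        simp
      · have hne : ((mnp p.reverse : Nat) : Int) ≠ 0 := by exact_mod_cast h0
        simp only [if_pos hne, if_neg h0]
        push_cast [Nat.cast_max]
        simp [max_comm]
    · subst hx
      simp only [way1Step, if_pos]
      rw [Msuf_cons, mpp_cons_zero, mnp_cons_zero]
      push_cast [Nat.cast_max]
      simp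
    · simp only [way1Step, if_neg (by omega : ¬ x = 0), if_pos hx]
      rw [Msuf_cons, mpp_cons_pos x hx, mnp_cons_pos x hx]
      by_cases h0 : mnp p.reverse = 0
      · have hne : ¬ ((mnp p.reverse : Nat) : Int) ≠ 0 := by simp [h0]
        simp only [if_neg hne, if_pos h0]
        push_cast [Nat.cast_max]
        simp [max_comm]
      · have hne : ((mnp p.reverse : Nat) : Int) ≠ 0 := by exact_mod_cast h0
        simp only [if_pos hne, if_neg h0]
        push_cast [Nat.cast_max]
        simp [max_comm]

lemma wayB_eq_Msuf (nums : List Int) : way1_alt nums = (Msuf nums.reverse : Int) := by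
  rw [way1_alt, altB_state]

-- ===== the exchange: Msuf is reversal-invariant =====

lemma foldr_max_le (L : List Nat) (a : Nat) (h : a ∈ L) : a ≤ L.foldr max 0 := by
  induction L with
  | nil => simp at h
  | cons b L ih =>
    rw [List.foldr_cons]
    rcases List.mem_cons.mp h with rfl | h'
    · omega
    · have := ih h'
      omega

lemma foldr_max_mem (L : List Nat) : L.foldr max 0 = 0 ∨ L.foldr max 0 ∈ L := by
  induction L with
  | nil => left; rfl
  | cons b L ih =>
    rw [List.foldr_cons]
    rcases Nat.le_total b (L.foldr max 0) with h | h
    · rw [max_eq_right h]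
      rcases ih with h0 | hm
      · left; exact h0
      · right; exact List.mem_cons_of_mem _ hm
    · rw [max_eq_left h]; right; simp

lemma drop_mem_tails (l : List Int) (i : Nat) : l.drop i ∈ l.tails := by
  simpa [List.mem_tails] using List.drop_suffix i l

lemma Msuf_ge (l : List Int) (i k : Nat) (hk : k ≤ (l.drop i).length)
    (h : (0 : Int) < ((l.drop i).take k).prod) : k ≤ Msuf l := by
  have h1 : k ≤ mpp (l.drop i) := mpp_max _ k hk h
  have h2 : mpp (l.drop i) ≤ Msuf l :=
    foldr_max_le _ _ (List.mem_map_of_mem (drop_mem_tails l i))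
  omega

lemma Msuf_qual (l : List Int) :
    Msuf l = 0 ∨ ∃ i, Msuf l ≤ (l.drop i).length ∧
      (0 : Int) < ((l.drop i).take (Msuf l)).prod := by
  rcases foldr_max_mem (l.tails.map mpp) with h | h
  · left; exact h
  · rcases List.mem_map.mp h with ⟨t, ht, hval⟩
    rcases (List.mem_tails _ _).mp ht with ⟨p, hp⟩
    right
    have hdrop : l.drop p.length = t := by rw [← hp]; simp
    have hMt : Msuf l = mpp t := by rw [Msuf]; exact hval.symm
    refine ⟨p.length, ?_, ?_⟩
    · rw [hdrop, hMt]; exact mpp_le_length t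
    · rw [hdrop, hMt]; exact mpp_qual t

lemma rev_slice (l : List Int) (i k : Nat) (hik : i + k ≤ l.length) :
    ((l.reverse.drop i).take k) = ((l.drop (l.length - i - k)).take k).reverse := by
  have key : ((l.drop (l.length - i - k)).take k).reverse = (l.reverse.drop i).take k := by
    have e2 : (l.drop (l.length - i - k)).take k
        = (l.take ((l.length - i - k) + k)).drop (l.length - i - k) := by
      rw [List.drop_take]
      congr 1
      omega
    rw [e2, List.reverse_drop, List.reverse_take]
    have c1 : (l.take (l.length - i - k + k)).length - (l.length - i - k) = k := by
      simp only [List.length_take]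
      omega
    have c2 : l.length - (l.length - i - k + k) = i := by omega
    rw [c1, c2]
  exact key.symm

lemma Msuf_reverse_le (l : List Int) : Msuf l.reverse ≤ Msuf l := by
  rcases Msuf_qual l.reverse with h | ⟨i, hlen, hprod⟩
  · omega
  · set k := Msuf l.reverse with hk
    rcases Nat.eq_zero_or_pos k with hk0 | hkpos
    · omega
    · have hik : i + k ≤ l.length := by
        rw [List.length_drop, List.length_reverse] at hlen
        omega
      rw [rev_slice l i k hik, List.prod_reverse] at hprod
      apply Msuf_ge l (l.length - i - k) k _ hprod
      rw [List.length_drop]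
      omega

lemma Msuf_reverse (l : List Int) : Msuf l.reverse = Msuf l := by
  apply le_antisymm (Msuf_reverse_le l)
  have := Msuf_reverse_le l.reverse
  rwa [List.reverse_reverse] at this

-- ===== VERDICT (by name: the statement is the Claim_ definition above) =====
theorem way1_spec : Claim_equal_way1 := by
  intro nums _
  unfold Spec_way1
  rw [wayA_eq_Msuf, wayB_eq_Msuf, Msuf_reverse]
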